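-- pv_equiv track=rewrite | github.com/jayKeegan/mcregor_testing | code/filter.py | check_ending_allowed
-- ===== SOURCE A (Python) =====
-- allowed_endings = ["l", "c", "d", "n", "1", "2"]
--
-- def check_ending_allowed(word):
--
--     # get last letter of word
--     try:
--         last_letter = word[-1]
--     except IndexError:
--         return None
--
--     # check if letter is not allowed
--     if last_letter not in allowed_endings:
--
--         # remove letter and start again
--         word = word[:-1]
--         return check_ending_allowed(word)
--
--     # return the correct word
--     return word
-- ===== SOURCE B (Python) =====
-- allowed_endings = ["l", "c", "d", "n", "1", "2"]
--
-- def check_ending_allowed(word):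
--     n = len(word)
--     for i, ch in enumerate(reversed(word)):
--         if ch in allowed_endings:
--             return word[:n - i]
--     return None
-- ===== Notes on version B (the rewrite author's own statement) =====
-- stated objective: alternative
-- what changed: B replaces A's recursion that repeatedly slices off the last character with a single scan of the reversed string that finds the first allowed character and takes one prefix slice, avoiding repeated re-slicing.
import Mathlib
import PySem

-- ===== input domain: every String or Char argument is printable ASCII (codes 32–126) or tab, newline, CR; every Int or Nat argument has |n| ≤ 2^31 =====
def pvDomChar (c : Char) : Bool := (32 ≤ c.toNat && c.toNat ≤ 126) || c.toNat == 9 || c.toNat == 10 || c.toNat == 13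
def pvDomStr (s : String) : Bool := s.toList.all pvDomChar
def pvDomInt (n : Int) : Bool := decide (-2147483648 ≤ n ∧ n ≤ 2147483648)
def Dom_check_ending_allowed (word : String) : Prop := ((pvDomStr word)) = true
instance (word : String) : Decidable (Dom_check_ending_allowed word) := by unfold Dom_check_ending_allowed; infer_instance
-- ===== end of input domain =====

-- B replaces A's recursive strip-last-and-retry with one scan of the reversed string; equal return value proved on all inputs.

-- ===== PORT A =====
def allowed_endings : List Char := ['l', 'c', 'd', 'n', '1', '2']

-- A's recursion on characters: word[-1] on a nonempty string is its last char (exact),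
-- word[:-1] is dropLast (exact), the empty case is the caught IndexError returning None.
def goA : List Char → Option (List Char)
  | [] => none
  | c :: rest =>
    if (c :: rest).getLast (by simp) ∈ allowed_endings then some (c :: rest)
    else goA (c :: rest).dropLast
termination_by cs => cs.length
decreasing_by simp [List.length_dropLast]

def check_ending_allowed (word : String) : Option String :=
  (goA word.toList).map String.ofList

-- ===== PORT B =====
-- Source B: for i, ch in enumerate(reversed(word)): if ch in allowed_endings: return word[:n-i]; return None.
-- goB runs on the REVERSED character list and returns the enumerate index i of the first allowed char.
def goB : List Char → Option Nat
  | [] => none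
  | c :: rest => if c ∈ allowed_endings then some 0 else (goB rest).map (· + 1)

def check_ending_allowed_alt (word : String) : Option String :=
  match goB word.toList.reverse with
  | none => none
  | some i => some (String.ofList (word.toList.take (word.toList.length - i)))

-- ===== PRECONDITION & SPEC =====
def Spec_check_ending_allowed (word : String) (out : Option String) : Prop := out = check_ending_allowed_alt word
instance (word : String) (out : Option String) : Decidable (Spec_check_ending_allowed word out) := by unfold Spec_check_ending_allowed; infer_instance

-- ===== CLAIM (what is proved, stated in full; the proofs are below) =====
def Claim_equal_check_ending_allowed : Prop := ∀ (word : String), Dom_check_ending_allowed word → Spec_check_ending_allowed word (check_ending_allowed word)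

-- ===== LEMMAS AND PROOFS =====

theorem goB_lt_length : ∀ (cs : List Char) (k : Nat), goB cs = some k → k < cs.length := by
  intro cs
  induction cs with
  | nil => intro k h; simp [goB] at h
  | cons c rest ih =>
    intro k h
    simp only [List.length_cons]
    by_cases hc : c ∈ allowed_endings
    · simp [goB, hc] at h; omega
    · simp [goB, hc] at h
      obtain ⟨j, hj, hk⟩ := h
      have := ih j hj
      omega

theorem goA_eq_goB : ∀ (cs : List Char),
    goA cs = match goB cs.reverse with
             | none => none
             | some i => some (cs.take (cs.length - i)) := by
  intro cs
  induction cs using List.reverseRecOn with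
  | nil => simp [goA, goB]
  | append_singleton ys c ih =>
    rw [List.reverse_append]
    simp only [List.reverse_cons, List.reverse_nil, List.nil_append, List.singleton_append]
    by_cases hc : c ∈ allowed_endings
    · have hne : ys ++ [c] ≠ [] := by simp
      rcases ys with _ | ⟨y, ys'⟩
      · simp [goA, goB, hc]
      · show goA (y :: (ys' ++ [c])) = _
        rw [goA]
        simp [goB, hc, List.take_of_length_le]
    · rcases hy : ys with _ | ⟨y, ys'⟩
      · simp [goA, goB, hc]
      · rw [← hy]
        have hys : ys ≠ [] := by simp [hy]
        have : goA (ys ++ [c]) = goA ys := by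
          rcases ys with _ | ⟨z, zs⟩
          · simp at hys
          · show goA (z :: (zs ++ [c])) = _
            rw [goA]
            simp [hc]
            rw [show (z :: (zs ++ [c])) = (z :: zs) ++ [c] by simp, List.dropLast_concat]
        rw [this, ih, goB]
        simp only [hc, if_false]
        cases hgb : goB ys.reverse with
        | none => simp
        | some j =>
          have hjlt : j < ys.length := by
            have := goB_lt_length ys.reverse j hgb
            simpa using this
          simp only [Option.map_some]
          have h1 : (ys ++ [c]).length - (j + 1) = ys.length - j := by
            simp
          rw [h1, List.take_append_of_le_length (by omega)]

-- ===== VERDICT (by name: the statement is the Claim_ definition above) =====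
theorem check_ending_allowed_spec : Claim_equal_check_ending_allowed := by
  intro word _
  show check_ending_allowed word = check_ending_allowed_alt word
  unfold check_ending_allowed check_ending_allowed_alt
  rw [goA_eq_goB]
  cases goB word.toList.reverse <;> simp
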